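-- pv_equiv track=rewrite | github.com/Adarve999/FundamentosProgramacion | Ejercicios Recursividad extra/busqueda de un elemento en una lista.py | _buscar_elem
-- ===== SOURCE A (Python) =====
-- def _buscar_elem(v,ini,fin,acu):
--     if ini>fin:
--         res=-1
--     else:
--         if v[ini]==acu:
--             res=v[ini]
--         else:
--             res=_buscar_elem(v,ini+1,fin,acu+v[ini])
--     return res
-- ===== SOURCE B (Python) =====
-- def _buscar_elem(v, ini, fin, acu):
--     for i in range(ini, fin + 1):
--         if v[i] == acu:
--             return v[i]
--         acu += v[i]
--     return -1
-- ===== Notes on version B (the rewrite author's own statement) =====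
-- stated objective: idiomatic
-- what changed: Replaced the tail recursion (which rebuilds the call with ini+1 and acu+v[ini]) by a flat for-loop over range(ini, fin+1) that threads the accumulator through a loop variable and returns early on a match.
import Mathlib
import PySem

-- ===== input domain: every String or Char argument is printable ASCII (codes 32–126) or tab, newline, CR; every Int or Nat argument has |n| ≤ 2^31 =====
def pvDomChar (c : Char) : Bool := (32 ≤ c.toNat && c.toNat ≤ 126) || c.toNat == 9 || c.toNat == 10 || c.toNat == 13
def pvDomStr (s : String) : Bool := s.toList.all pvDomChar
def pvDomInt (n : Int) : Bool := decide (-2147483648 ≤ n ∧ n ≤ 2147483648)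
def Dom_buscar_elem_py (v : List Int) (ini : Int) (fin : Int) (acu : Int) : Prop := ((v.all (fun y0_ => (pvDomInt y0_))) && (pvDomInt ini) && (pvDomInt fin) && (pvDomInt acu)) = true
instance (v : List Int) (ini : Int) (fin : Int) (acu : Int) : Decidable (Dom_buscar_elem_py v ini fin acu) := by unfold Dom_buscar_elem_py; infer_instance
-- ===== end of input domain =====

-- B replaces A's tail recursion by a flat iteration over range(ini, fin+1) threading the accumulator (idiomatic decomposition; same cost).


-- ===== PORT A =====
-- literal transliteration of A's recursion; pyGet? = v[ini] (none = IndexError, excluded by Pre_)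
def buscar_elem_py (v : List Int) (ini : Int) (fin : Int) (acu : Int) : Int :=
  if ini > fin then -1
  else
    match PySem.List.pyGet? v ini with
    | none => -1  -- Python raises IndexError here; such inputs are outside Pre_
    | some x => if x = acu then x else buscar_elem_py v (ini + 1) fin (acu + x)
termination_by (fin + 1 - ini).toNat
decreasing_by omega

-- ===== PORT B =====
-- B's for-loop body: walk the index list range(ini, fin+1), threading acu, early return on match
def buscarLoop (v : List Int) : List Int → Int → Int
  | [], _ => -1
  | i :: rest, acu =>
    match PySem.List.pyGet? v i with
    | none => -1  -- Python raises IndexError here; such inputs are outside Pre_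
    | some x => if x = acu then x else buscarLoop v rest (acu + x)

def buscar_elem_py_alt (v : List Int) (ini : Int) (fin : Int) (acu : Int) : Int :=
  buscarLoop v (PySem.List.pyRange ini (fin + 1) 1) acu

-- ===== PRECONDITION & SPEC =====
-- The sequence of elements A (and B alike) visits, after Python's negative-index wrap at the start:
def pvScan (v : List Int) (ini : Int) : List Int :=
  if ini < 0 then v.drop ((v.length : Int) + ini).toNat ++ v
  else v.drop ini.toNat

-- Pre_ excludes EXACTLY the inputs on which Python A raises IndexError (B raises there too):
-- the scan starts out of range, or walks past the last valid index without ever meeting a match.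
def Pre_buscar_elem_py (v : List Int) (ini : Int) (fin : Int) (acu : Int) : Prop :=
  ¬ (ini ≤ fin ∧
      (ini < -(v.length : Int) ∨ (v.length : Int) ≤ ini ∨
        ((v.length : Int) ≤ fin ∧
          ∀ j : Nat, j < (pvScan v ini).length →
            (pvScan v ini).getD j 0 ≠ acu + ((pvScan v ini).take j).sum)))
instance (v : List Int) (ini : Int) (fin : Int) (acu : Int) : Decidable (Pre_buscar_elem_py v ini fin acu) := by unfold Pre_buscar_elem_py; infer_instance
def pvWitness_buscar_elem_py : List Int × Int × Int × Int := ([1, 2, 3], 0, 2, 3)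

def Spec_buscar_elem_py (v : List Int) (ini : Int) (fin : Int) (acu : Int) (out : Int) : Prop := out = buscar_elem_py_alt v ini fin acu
instance (v : List Int) (ini : Int) (fin : Int) (acu : Int) (out : Int) : Decidable (Spec_buscar_elem_py v ini fin acu out) := by unfold Spec_buscar_elem_py; infer_instance

-- ===== CLAIM (what is proved, stated in full; the proofs are below) =====
def Claim_equal_buscar_elem_py : Prop := ∀ (v : List Int) (ini : Int) (fin : Int) (acu : Int), Dom_buscar_elem_py v ini fin acu → Pre_buscar_elem_py v ini fin acu → Spec_buscar_elem_py v ini fin acu (buscar_elem_py v ini fin acu)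

-- ===== LEMMAS AND PROOFS =====

-- The two ports agree on every input (the -1-on-none totalisations coincide as well).
theorem buscar_eq (v : List Int) (fin : Int) :
    ∀ (n : Nat) (ini acu : Int), (fin + 1 - ini).toNat = n →
      buscar_elem_py v ini fin acu = buscarLoop v (PySem.List.pyRange ini (fin + 1) 1) acu := by
  intro n
  induction n with
  | zero =>
    intro ini acu h
    have hgt : ini > fin := by omega
    rw [buscar_elem_py, if_pos hgt, PySem.List.pyRange_one]
    have : (fin + 1 - ini).toNat = 0 := h
    simp [this, buscarLoop]
  | succ m ih =>
    intro ini acu h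
    have hle : ¬ ini > fin := by omega
    have hlt : ini < fin + 1 := by omega
    rw [buscar_elem_py, if_neg hle, PySem.List.pyRange_one_cons hlt]
    simp only [buscarLoop]
    cases PySem.List.pyGet? v ini with
    | none => rfl
    | some x =>
      simp only
      by_cases hx : x = acu
      · simp [hx]
      · simp only [if_neg hx]
        exact ih (ini + 1) (acu + x) (by omega)

-- ===== VERDICT (by name: the statement is the Claim_ definition above) =====
theorem buscar_elem_py_spec : Claim_equal_buscar_elem_py := by
  intro v ini fin acu _ _
  unfold Spec_buscar_elem_py buscar_elem_py_alt
  exact buscar_eq v fin (fin + 1 - ini).toNat ini acu rfl
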